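-- pv_equiv track=rewrite | github.com/Marv0192/CSC471_Project_2 | Project_2.py | cfg_pSet
-- ===== SOURCE A (Python) =====
-- def cfg_pSet(rule, V, i):
--     if len(V) == i:
--         return rule
--     elif V[i] in rule:
--         if rule[0] == rule[-1] and rule[0].isupper() and len(rule) > 1:
--             new_rule = rule.lstrip(rule[0]) + "|" + rule.rstrip(rule[-1])
--             rule += "|" + new_rule
--             return cfg_pSet(rule, V, i+1)
--
--         new_rule = rule.replace(V[i], "")
--         if new_rule == "":
--             return cfg_pSet(rule, V, i+1)
--
--         rule +=  "|" + new_rule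
--         return cfg_pSet(rule, V, i+1)
--     else:
--         return cfg_pSet(rule, V, i+1)
-- ===== SOURCE B (Python) =====
-- def _extension(rule, v):
--     """Return the segment to append for variable v, or None if nothing is appended."""
--     if v not in rule:
--         return None
--     if len(rule) > 1 and rule[0] == rule[-1] and rule[0].isupper():
--         return "|" + rule.lstrip(rule[0]) + "|" + rule.rstrip(rule[-1])
--     stripped = rule.replace(v, "")
--     return "|" + stripped if stripped else None
--
-- def cfg_pSet(rule, V, i):
--     pending = [V[j] for j in range(i, len(V))]
--     for v in pending:
--         seg = _extension(rule, v)
--         if seg is not None: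
--             rule += seg
--     return rule
-- ===== Notes on version B (the rewrite author's own statement) =====
-- stated objective: simpler
-- what changed: Factors the per-variable decision into a helper _extension returning an optional segment, precomputes the visited variables [V[j] for j in range(i, len(V))], and folds the helper over that list instead of A's tail recursion with branch-local appends.
import Mathlib
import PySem

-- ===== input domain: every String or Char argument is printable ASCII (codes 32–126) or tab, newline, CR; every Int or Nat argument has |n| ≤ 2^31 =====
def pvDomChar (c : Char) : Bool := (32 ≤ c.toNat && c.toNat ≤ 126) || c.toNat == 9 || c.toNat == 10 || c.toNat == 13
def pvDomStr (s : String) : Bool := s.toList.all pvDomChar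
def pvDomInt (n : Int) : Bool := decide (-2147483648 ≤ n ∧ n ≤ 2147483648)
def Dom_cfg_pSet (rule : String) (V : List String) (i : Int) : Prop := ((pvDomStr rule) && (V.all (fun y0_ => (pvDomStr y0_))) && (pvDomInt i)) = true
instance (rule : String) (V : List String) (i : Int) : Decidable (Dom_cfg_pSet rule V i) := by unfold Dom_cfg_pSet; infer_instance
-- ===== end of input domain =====

-- B factors the per-variable decision into a helper returning an optional segment and folds it over
-- the precomputed list of visited variables [V[j] for j in range(i, len(V))] (objective: simpler).
-- Return-value equivalence only; neither version mutates its arguments.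

-- ===== PORT A =====
-- A's tail recursion, on the code points of `rule`; fuel counts the remaining recursion depth
-- (exactly (len(V) - i) calls remain, so the fuel chosen in cfg_pSet below is never exhausted).
def cfg_pSet_go (V : List String) : Nat → List Char → Int → List Char
  | 0, rule, _ => rule
  | fuel+1, rule, i =>
    if (V.length : Int) = i then rule
    else
      match PySem.List.pyGet? V i with
      | none => rule   -- V[i] raises IndexError: excluded by Pre_
      | some v =>
        if PySem.Chars.isIn v.toList rule then
          match PySem.List.pyGet? rule 0, PySem.List.pyGet? rule (-1) with
          | some c0, some cl =>
            if c0 = cl ∧ PySem.Chars.isupper c0 = true ∧ 1 < rule.length then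
              -- rule.lstrip(rule[0]) / rule.rstrip(rule[-1]) with a single-character strip set:
              -- exact as dropWhile (resp. dropWhile on the reverse)
              cfg_pSet_go V fuel
                (rule ++ '|' :: (rule.dropWhile (· == c0) ++ '|' :: (rule.reverse.dropWhile (· == cl)).reverse))
                (i+1)
            else
              let new_rule := PySem.Chars.replace rule v.toList []
              if new_rule = [] then cfg_pSet_go V fuel rule (i+1)
              else cfg_pSet_go V fuel (rule ++ '|' :: new_rule) (i+1)
          | _, _ => rule   -- rule[0] raises IndexError (rule = ""): excluded by Pre_
        else cfg_pSet_go V fuel rule (i+1)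

def cfg_pSet (rule : String) (V : List String) (i : Int) : String :=
  String.ofList (cfg_pSet_go V ((V.length : Int) - i).toNat rule.toList i)

-- ===== PORT B =====
-- _extension(rule, v): the segment appended for variable v, or none when nothing is appended.
-- rule[0]/rule[-1] occur only under the guard len(rule) > 1, so headD/getLastD are exact there;
-- lstrip/rstrip with a single-character strip set are dropWhile / rdropWhile.
def cfg_extension (rule v : List Char) : Option (List Char) :=
  if ¬ PySem.Chars.isIn v rule then none
  else if 1 < rule.length ∧ rule.headD ' ' = rule.getLastD ' ' ∧ PySem.Chars.isupper (rule.headD ' ') = true then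
    some ('|' :: rule.dropWhile (· == rule.headD ' ') ++ '|' :: List.rdropWhile (· == rule.getLastD ' ') rule)
  else
    let stripped := PySem.Chars.replace rule v []
    if stripped = [] then none else some ('|' :: stripped)

-- pending = [V[j] for j in range(i, len(V))]; then fold the optional extension over it
def cfg_pSet_alt (rule : String) (V : List String) (i : Int) : String :=
  let pending := (PySem.List.pyRange i (V.length : Int) 1).map (fun j => (PySem.List.pyGet? V j).getD "")
  String.ofList (pending.foldl (fun r v =>
    match cfg_extension r v.toList with
    | none => r
    | some seg => r ++ seg) rule.toList)

-- ===== PRECONDITION & SPEC =====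
-- Pre_ excludes exactly the inputs where A raises IndexError: an index i outside [-len(V), len(V)],
-- or an empty `rule` together with an empty string among the list elements the recursion visits
-- (there `"" in ""` holds and rule[0] raises).
def Pre_cfg_pSet (rule : String) (V : List String) (i : Int) : Prop :=
  -(V.length : Int) ≤ i ∧ i ≤ (V.length : Int) ∧
    (rule = "" → "" ∉ (if i < 0 then V else V.drop i.toNat))
instance (rule : String) (V : List String) (i : Int) : Decidable (Pre_cfg_pSet rule V i) := by
  unfold Pre_cfg_pSet; infer_instance

def pvWitness_cfg_pSet : String × List String × Int := ("S", ["A"], 0)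

def Spec_cfg_pSet (rule : String) (V : List String) (i : Int) (out : String) : Prop := out = cfg_pSet_alt rule V i
instance (rule : String) (V : List String) (i : Int) (out : String) : Decidable (Spec_cfg_pSet rule V i out) := by unfold Spec_cfg_pSet; infer_instance

-- ===== CLAIM (what is proved, stated in full; the proofs are below) =====
def Claim_equal_cfg_pSet : Prop := ∀ (rule : String) (V : List String) (i : Int), Dom_cfg_pSet rule V i → Pre_cfg_pSet rule V i → Spec_cfg_pSet rule V i (cfg_pSet rule V i)


-- ===== LEMMAS AND PROOFS =====

-- B's loop body, with V[j] already resolved to its value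
def cfg_bstep (V : List String) (r : List Char) (j : Int) : List Char :=
  match cfg_extension r ((PySem.List.pyGet? V j).getD "").toList with
  | none => r
  | some seg => r ++ seg

-- A's per-step result coincides with B's extension step whenever the step cannot raise
lemma cfg_step_agree (r : List Char) (v : String)
    (hnc : r = [] → v.toList ≠ [])
    (k : List Char → Int → List Char) (i : Int) :
    (if PySem.Chars.isIn v.toList r then
      match PySem.List.pyGet? r 0, PySem.List.pyGet? r (-1) with
      | some c0, some cl =>
        if c0 = cl ∧ PySem.Chars.isupper c0 = true ∧ 1 < r.length then
          k (r ++ '|' :: (r.dropWhile (· == c0) ++ '|' :: (r.reverse.dropWhile (· == cl)).reverse)) (i+1)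
        else
          let new_rule := PySem.Chars.replace r v.toList []
          if new_rule = [] then k r (i+1)
          else k r (i+1) |> fun _ => k (r ++ '|' :: new_rule) (i+1)
      | _, _ => r
    else k r (i+1)) =
      k (match cfg_extension r v.toList with
         | none => r
         | some seg => r ++ seg) (i+1) := by
  unfold cfg_extension
  by_cases hin : PySem.Chars.isIn v.toList r = true
  · rw [if_pos hin]
    simp only [hin, not_true_eq_false, if_false]
    cases r with
    | nil =>
      exfalso
      have hvt : v.toList = [] := by
        rw [PySem.Chars.isIn_iff_infix] at hin
        simpa using hin
      exact hnc rfl hvt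
    | cons c cs =>
      have hC : PySem.List.pyGet? (c :: cs) 0 = some c := PySem.List.pyGet?_zero_cons c cs
      have hL : PySem.List.pyGet? (c :: cs) (-1) = some ((c :: cs).getLast (by simp)) := by
        rw [PySem.List.pyGet?_neg_one]
        exact List.getLast?_eq_some_getLast (by simp)
      simp only [hC, hL]
      have hhd : (c :: cs).headD ' ' = c := rfl
      have hlt : (c :: cs).getLastD ' ' = (c :: cs).getLast (by simp) := by
        rw [List.getLastD_eq_getLast?, List.getLast?_eq_some_getLast (by simp)]
        rfl
      by_cases hp : c = (c :: cs).getLast (by simp) ∧ PySem.Chars.isupper c = true ∧ 1 < (c :: cs).length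
      · have hB : 1 < (c :: cs).length ∧ (c :: cs).headD ' ' = (c :: cs).getLastD ' ' ∧
            PySem.Chars.isupper ((c :: cs).headD ' ') = true := by
          rw [hhd, hlt]; exact ⟨hp.2.2, hp.1, hp.2.1⟩
        rw [if_pos hp, if_pos hB, hhd, hlt]
        simp [List.rdropWhile]
      · have hB : ¬(1 < (c :: cs).length ∧ (c :: cs).headD ' ' = (c :: cs).getLastD ' ' ∧
            PySem.Chars.isupper ((c :: cs).headD ' ') = true) := by
          rw [hhd, hlt]; rintro ⟨hx1, hx2, hx3⟩; exact hp ⟨hx2, hx3, hx1⟩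
        rw [if_neg hp, if_neg hB]
        by_cases hnr : PySem.Chars.replace (c :: cs) v.toList [] = []
        · simp [hnr]
        · simp [hnr]
  · rw [if_neg hin]
    simp [hin]

lemma cfg_pSet_go_eq (V : List String) : ∀ (fuel : Nat) (r : List Char) (i : Int),
    i + (fuel : Int) = (V.length : Int) →
    -(V.length : Int) ≤ i →
    (r = [] → ∀ j v, i ≤ j → j < (V.length : Int) → PySem.List.pyGet? V j = some v → v.toList ≠ []) →
    cfg_pSet_go V fuel r i = (PySem.List.pyRange i (V.length : Int) 1).foldl (cfg_bstep V) r := by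
  intro fuel
  induction fuel with
  | zero =>
    intro r i h1 _ _
    rw [PySem.List.pyRange_one_eq_nil (by omega)]
    rfl
  | succ fuel ih =>
    intro r i h1 h2 h3
    rw [PySem.List.pyRange_one_cons (by omega), List.foldl_cons]
    cases hv : PySem.List.pyGet? V i with
    | none =>
      exfalso
      rw [PySem.List.pyGet?_eq_none_iff] at hv
      simp [PySem.Raise.InRange] at hv
      omega
    | some v =>
      unfold cfg_pSet_go cfg_bstep
      rw [if_neg (by omega)]
      simp only [hv, Option.getD_some]
      have hstep := cfg_step_agree r v
        (fun hr hvt => h3 hr i v le_rfl (by omega) hv hvt)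
        (fun r' _ => (PySem.List.pyRange (i+1) (V.length : Int) 1).foldl (cfg_bstep V) r') i
      -- rewrite each tail call of A's step into the B-side fold via ih, then close with hstep
      by_cases hin : PySem.Chars.isIn v.toList r = true
      · rw [if_pos hin] at hstep ⊢
        cases r with
        | nil =>
          exfalso
          have hvt : v.toList = [] := by
            rw [PySem.Chars.isIn_iff_infix] at hin
            simpa using hin
          exact h3 rfl i v le_rfl (by omega) hv hvt
        | cons c cs =>
          have hC : PySem.List.pyGet? (c :: cs) 0 = some c := PySem.List.pyGet?_zero_cons c cs
          have hL : PySem.List.pyGet? (c :: cs) (-1) = some ((c :: cs).getLast (by simp)) := by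
            rw [PySem.List.pyGet?_neg_one]
            exact List.getLast?_eq_some_getLast (by simp)
          simp only [hC, hL] at hstep ⊢
          by_cases hp : c = (c :: cs).getLast (by simp) ∧ PySem.Chars.isupper c = true ∧ 1 < (c :: cs).length
          · rw [if_pos hp] at hstep ⊢
            rw [ih _ _ (by push_cast at h1 ⊢; omega) (by omega) (by intro h; simp at h)]
            exact hstep
          · rw [if_neg hp] at hstep ⊢
            by_cases hnr : PySem.Chars.replace (c :: cs) v.toList [] = []
            · simp only [hnr, if_true] at hstep ⊢
              rw [ih _ _ (by push_cast at h1 ⊢; omega) (by omega) (by intro h; simp at h)]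
              exact hstep
            · simp only [if_neg hnr] at hstep ⊢
              rw [ih _ _ (by push_cast at h1 ⊢; omega) (by omega) (by intro h; simp at h)]
              exact hstep
      · rw [if_neg hin] at hstep ⊢
        rw [ih _ _ (by push_cast at h1 ⊢; omega) (by omega)
          (fun hr j v' hj1 hj2 hpg => h3 hr j v' (by omega) hj2 hpg)]
        exact hstep

theorem cfg_pSet_spec : Claim_equal_cfg_pSet := by
  intro rule V i _ hPre
  unfold Spec_cfg_pSet cfg_pSet cfg_pSet_alt
  unfold Pre_cfg_pSet at hPre
  obtain ⟨h1, h2, h3⟩ := hPre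
  have hside : rule.toList = [] → ∀ j v, i ≤ j → j < (V.length : Int) →
      PySem.List.pyGet? V j = some v → v.toList ≠ [] := by
    intro hr j v hj1 hj2 hpg hvt
    have hrule : rule = "" := String.toList_eq_nil_iff.mp hr
    have hveq : v = "" := String.toList_eq_nil_iff.mp hvt
    have hmem : v ∈ V := PySem.List.mem_of_pyGet?_eq_some V hpg
    have hni := h3 hrule
    by_cases hi : i < 0
    · rw [if_pos hi] at hni
      exact hni (hveq ▸ hmem)
    · rw [if_neg hi] at hni
      apply hni
      have hj0 : 0 ≤ j := by omega
      rw [PySem.List.pyGet?_of_nonneg V hj0] at hpg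
      have : (V.drop i.toNat)[j.toNat - i.toNat]? = some v := by
        rw [List.getElem?_drop]
        rw [show i.toNat + (j.toNat - i.toNat) = j.toNat by omega]
        exact hpg
      exact hveq ▸ List.mem_of_getElem? this
  rw [cfg_pSet_go_eq V _ rule.toList i (by omega) h1 hside]
  simp only [List.foldl_map]
  rfl
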